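-- pv_equiv track=rewrite | github.com/atsybulskiy13/ooniver | my_django/mysite/utils.py | if_palindrom
-- ===== SOURCE A (Python) =====
-- def if_palindrom(string: str):
--
--     splited_string = string.split()
--
--     join_string = ''.join(splited_string)
--
--     new_string = ''
--
--     for char in join_string:
--         new_string = char + new_string
--
--     if new_string == join_string:
--         return True
--     else:
--         return False
-- ===== SOURCE B (Python) =====
-- def if_palindrom(string: str):
--     s = ''.join(string.split())
--     i, j = 0, len(s) - 1
--     while i < j:
--         if s[i] != s[j]:
--             return False
--         i += 1
--         j -= 1
--     return True
-- ===== Notes on version B (the rewrite author's own statement) =====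
-- stated objective: faster
-- what changed: Replaces building a reversed copy by repeated string prepending plus a full comparison with a two-pointer scan from both ends that short-circuits on the first mismatch.
import Mathlib
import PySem

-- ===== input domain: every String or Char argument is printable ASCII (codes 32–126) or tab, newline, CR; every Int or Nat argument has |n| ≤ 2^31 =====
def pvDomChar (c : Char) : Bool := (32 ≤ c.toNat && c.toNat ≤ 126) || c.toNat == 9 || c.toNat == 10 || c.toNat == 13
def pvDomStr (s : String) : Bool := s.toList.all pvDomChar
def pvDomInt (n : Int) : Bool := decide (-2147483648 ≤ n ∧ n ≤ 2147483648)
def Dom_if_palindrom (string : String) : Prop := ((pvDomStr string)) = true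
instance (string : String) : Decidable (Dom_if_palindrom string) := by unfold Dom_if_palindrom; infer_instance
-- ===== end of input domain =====

-- B replaces A's quadratic build-reversed-string-by-prepending with a linear two-pointer scan that short-circuits on the first mismatch.

-- ===== PORT A =====
def if_palindrom (string : String) : Bool :=
  let splited_string := PySem.Str.split₀ string
  let join_string := PySem.Str.join "" splited_string
  let new_string := join_string.toList.foldl (fun acc c => c :: acc) ([] : List Char)
  if new_string = join_string.toList then true else false

-- ===== PORT B =====
def palLoop (cs : List Char) (i j : Nat) : Bool :=
  if i < j then
    if cs[i]? ≠ cs[j]? then false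
    else palLoop cs (i + 1) (j - 1)
  else true
termination_by j - i
decreasing_by omega

def if_palindrom_alt (string : String) : Bool :=
  let s := (PySem.Str.join "" (PySem.Str.split₀ string)).toList
  palLoop s 0 (s.length - 1)

-- ===== PRECONDITION & SPEC =====
def Spec_if_palindrom (string : String) (out : Bool) : Prop := out = if_palindrom_alt string
instance (string : String) (out : Bool) : Decidable (Spec_if_palindrom string out) := by unfold Spec_if_palindrom; infer_instance

-- ===== CLAIM (what is proved, stated in full; the proofs are below) =====
def Claim_equal_if_palindrom : Prop := ∀ (string : String), Dom_if_palindrom string → Spec_if_palindrom string (if_palindrom string)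

-- ===== LEMMAS AND PROOFS =====

theorem foldl_cons_eq_reverse_append (l acc : List Char) :
    l.foldl (fun acc c => c :: acc) acc = l.reverse ++ acc := by
  induction l generalizing acc with
  | nil => simp
  | cons x xs ih => simp [List.foldl, ih]

theorem palLoop_iff (cs : List Char) (i j : Nat) (h : i + j + 1 = cs.length) :
    (palLoop cs i j = true ↔ ∀ k, i ≤ k → k ≤ j → cs[k]? = cs[i + j - k]?) := by
  by_cases hij : i < j
  · have hsum : (i + 1) + (j - 1) + 1 = cs.length := by omega
    rw [palLoop]
    simp only [hij, if_true]
    by_cases hc : cs[i]? = cs[j]?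
    · have ih := palLoop_iff cs (i + 1) (j - 1) hsum
      simp only [hc, ne_eq, not_true_eq_false, if_false, ih]
      constructor
      · intro H k hk1 hk2
        by_cases hki : k = i
        · subst hki; simpa using hc
        · by_cases hkj : k = j
          · have h1 : i + j - k = i := by omega
            rw [h1, hkj]; exact hc.symm
          · have := H k (by omega) (by omega)
            have heq : i + 1 + (j - 1) - k = i + j - k := by omega
            rwa [heq] at this
      · intro H k hk1 hk2
        have := H k (by omega) (by omega)
        have heq : i + 1 + (j - 1) - k = i + j - k := by omega
        rwa [heq]
    · rw [if_pos (by simpa using hc)]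
      simp only [Bool.false_eq_true, false_iff]
      intro H
      have := H i (le_refl i) (by omega)
      have heq : i + j - i = j := by omega
      rw [heq] at this
      exact hc this
  · rw [palLoop, if_neg hij]
    constructor
    · intro _ k hk1 hk2
      have hk : k = i ∧ k = j := by omega
      obtain ⟨rfl, h2⟩ := hk
      have h3 : k + j - k = j := by omega
      rw [h3, h2]
    · intro _; rfl
termination_by j - i
decreasing_by omega

theorem palLoop_eq_reverse_beq (cs : List Char) :
    palLoop cs 0 (cs.length - 1) = decide (cs.reverse = cs) := by
  cases hcs : cs with
  | nil => simp [palLoop]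
  | cons a l =>
    rw [← hcs]
    have hlen : 0 < cs.length := by rw [hcs]; simp
    rw [Bool.eq_iff_iff]
    rw [palLoop_iff cs 0 (cs.length - 1) (by omega)]
    rw [decide_eq_true_iff]
    constructor
    · intro H
      apply List.ext_getElem?
      intro k
      by_cases hk : k < cs.length
      · rw [List.getElem?_reverse hk]
        have := H k (by omega) (by omega)
        have heq : 0 + (cs.length - 1) - k = cs.length - 1 - k := by omega
        rw [heq] at this
        exact this.symm
      · rw [List.getElem?_eq_none (by rw [List.length_reverse]; omega), List.getElem?_eq_none (by omega)]
    · intro H k hk1 hk2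
      have hk : k < cs.length := by omega
      have := congrArg (fun l => l[k]?) H
      simp only at this
      rw [List.getElem?_reverse hk] at this
      have heq : 0 + (cs.length - 1) - k = cs.length - 1 - k := by omega
      rw [heq]
      exact this.symm

-- ===== VERDICT (by name: the statement is the Claim_ definition above) =====
theorem if_palindrom_spec : Claim_equal_if_palindrom := by
  intro string _
  unfold Spec_if_palindrom if_palindrom if_palindrom_alt
  simp only [foldl_cons_eq_reverse_append, List.append_nil, palLoop_eq_reverse_beq]
  by_cases h : (PySem.Str.join "" (PySem.Str.split₀ string)).toList.reverse
      = (PySem.Str.join "" (PySem.Str.split₀ string)).toList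
  · rw [if_pos h]; exact (decide_eq_true h).symm
  · rw [if_neg h]; exact (decide_eq_false h).symm
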